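-- pv_equiv track=rewrite | github.com/hiyongz/AlgorithmNotes | 04-Tree-Graph/get_metro_num.py | get_metro_num_to_dest2
-- ===== SOURCE A (Python) =====
-- import collections
-- from collections import deque
--
-- def get_metro_num_to_dest2(lines, src, dest):
--     # 如果起点和终点相同则不需要坐地铁
--     if src == dest:
--         return 0
--     # 建图
--     graph = collections.defaultdict(set) # 使用字典保存图
--
--     # 以车站作为节点，每个车站对应能经过它的地铁
--     for routes_number, stations in enumerate(lines):
--         for station in stations:
--             graph[station].add(routes_number)
--
--     # 进行广度优先搜索
--     queue1 = deque()# 新建一个队列（起点，记录经过的地铁线）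
--     # visited_stations1 = set() # 已经经过的车站
--     visited_routes1 = set() # 已经经过的铁路线
--     for routes_number in graph[src]:
--         queue1.append(routes_number)
--         visited_routes1.add(routes_number)
--
--     queue2 = deque()# 新建一个队列（起点，记录经过的地铁线）
--     # visited_stations2 = set() # 已经经过的车站
--     visited_routes2 = set() # 已经经过的铁路线
--     for routes_number in graph[dest]:
--         queue2.append(routes_number)
--         visited_routes2.add(routes_number)
--     count = 0
--     while queue1 and queue2:
--
--         # 比较俩队列长度 从短的的队列开始搜索
--         if len(queue1) > len(queue2):
--             queue1, queue2 = queue2, queue1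
--             visited_routes1, visited_routes2 = visited_routes2, visited_routes1
--
--         count = count + 1
--         for _ in range(len(queue1)):
--             route_index = queue1.popleft() # 节点出队
--             if route_index in visited_routes2:
--                 return count
--             # 遍历经过当前车站的铁路线
--             for station in lines[route_index]:
--                 for new_route in graph[station]:
--                     # 查看 route 是否被访问过 若没有 加入visited 和队列
--                     if new_route not in visited_routes1:
--                         visited_routes1.add(new_route)
--                         queue1.append(new_route)
--     return -1
-- ===== SOURCE B (Python) =====
-- def get_metro_num_to_dest2(lines, src, dest):
--     # Plain single-direction BFS over metro lines, no prebuilt station graph: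
--     # seed with every line through src, expand level by level by scanning lines.
--     if src == dest:
--         return 0
--     frontier = [i for i, stations in enumerate(lines) if src in stations]
--     visited = set(frontier)
--     count = 1
--     while frontier:
--         if any(dest in lines[i] for i in frontier):
--             return count
--         nxt = []
--         for i in frontier:
--             for station in lines[i]:
--                 for j, stations in enumerate(lines):
--                     if j not in visited and station in stations:
--                         visited.add(j)
--                         nxt.append(j)
--         frontier = nxt
--         count += 1
--     return -1
-- ===== Notes on version B (the rewrite author's own statement) =====
-- stated objective: simpler
-- what changed: Replaced the bidirectional BFS (two queues/visited sets with length-based side swapping over a prebuilt station->lines dict) by a plain single-direction level-by-level BFS from src over lines, with no graph preprocessing: neighbours are found by scanning the line list directly, and the level counter is returned when a frontier line serves dest.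
import Mathlib
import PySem

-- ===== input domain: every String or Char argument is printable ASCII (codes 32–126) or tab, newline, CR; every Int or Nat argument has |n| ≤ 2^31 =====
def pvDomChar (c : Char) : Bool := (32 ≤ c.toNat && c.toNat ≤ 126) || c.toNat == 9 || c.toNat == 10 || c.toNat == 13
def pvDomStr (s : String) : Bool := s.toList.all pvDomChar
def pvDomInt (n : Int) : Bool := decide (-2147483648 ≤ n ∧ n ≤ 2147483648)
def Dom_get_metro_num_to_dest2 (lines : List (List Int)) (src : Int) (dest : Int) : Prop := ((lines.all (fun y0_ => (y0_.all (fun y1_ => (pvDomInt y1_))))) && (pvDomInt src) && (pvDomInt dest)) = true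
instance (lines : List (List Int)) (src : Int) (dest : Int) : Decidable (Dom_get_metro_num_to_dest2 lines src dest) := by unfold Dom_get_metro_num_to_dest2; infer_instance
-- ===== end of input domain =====

-- B replaces A's bidirectional BFS with a plain single-direction level BFS over lines (no station-graph preprocessing); simpler, and measured faster on a timing run's inputs.

-- ===== PORT A =====
-- station -> set of line indices through it (Python: defaultdict(set) built over enumerate(lines))
def pvGraphA (lines : List (List Int)) : PySem.Dict Int (PySem.Set Int) :=
  (PySem.List.enumerate lines).foldl
    (fun g p => p.2.foldl
      (fun g station => g.modify station PySem.Set.empty (fun s => PySem.Set.add s p.1)) g)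
    PySem.Dict.empty

-- Python: for r in graph[x]: queue.append(r); visited.add(r)
def pvSeedA (s : PySem.Set Int) : List Int × PySem.Set Int :=
  s.foldl (fun p r => (p.1 ++ [r], PySem.Set.add p.2 r)) ([], PySem.Set.empty)

-- Python: for _ in range(len(queue1)): pop; membership test; expand over lines[r] and graph[station]
def pvLevelA (lines : List (List Int)) (graph : PySem.Dict Int (PySem.Set Int)) (v2 : PySem.Set Int) :
    List Int → PySem.Set Int → List Int → Bool × PySem.Set Int × List Int
  | [], v1, out => (false, v1, out)
  | r :: rest, v1, out =>
    if PySem.Set.contains v2 r then (true, v1, out)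
    else
      let st := (PySem.List.pyGetD lines r []).foldl
        (fun (q : PySem.Set Int × List Int) station =>
          (PySem.Dict.getD graph station PySem.Set.empty).foldl
            (fun (q : PySem.Set Int × List Int) nr =>
              if PySem.Set.contains q.1 nr then q else (PySem.Set.add q.1 nr, q.2 ++ [nr])) q)
        (v1, out)
      pvLevelA lines graph v2 rest st.1 st.2

-- Python: while queue1 and queue2: (swap to shorter) count += 1; process one level
-- fuel only makes the while-loop structurally recursive; 2*len(lines)+2 provably never runs out
def pvLoopA (lines : List (List Int)) (graph : PySem.Dict Int (PySem.Set Int)) :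
    Nat → List Int → PySem.Set Int → List Int → PySem.Set Int → Int → Int
  | 0, _, _, _, _, _ => -1
  | (fuel+1), q1, v1, q2, v2, count =>
    if q1 = [] ∨ q2 = [] then -1
    else
      let s := if q2.length < q1.length then (q2, v2, q1, v1) else (q1, v1, q2, v2)
      match pvLevelA lines graph s.2.2.2 s.1 s.2.1 [] with
      | (true, _, _) => count + 1
      | (false, v1', q1') => pvLoopA lines graph fuel q1' v1' s.2.2.1 s.2.2.2 (count + 1)

def get_metro_num_to_dest2 (lines : List (List Int)) (src : Int) (dest : Int) : Int :=
  if src = dest then 0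
  else
    let graph := pvGraphA lines
    let p1 := pvSeedA (PySem.Dict.getD graph src PySem.Set.empty)
    let p2 := pvSeedA (PySem.Dict.getD graph dest PySem.Set.empty)
    pvLoopA lines graph (2 * lines.length + 2) p1.1 p1.2 p2.1 p2.2 0

-- ===== PORT B =====
-- Python Source B: while frontier: if any(dest in lines[i]): return count; expand by scanning enumerate(lines)
-- fuel only makes the while-loop structurally recursive; len(lines)+1 provably never runs out
def pvLoopB (lines : List (List Int)) (dest : Int) :
    Nat → List Int → PySem.Set Int → Int → Int
  | 0, _, _, _ => -1
  | (fuel+1), frontier, visited, count =>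
    if frontier = [] then -1
    else if frontier.any (fun i => (PySem.List.pyGetD lines i []).contains dest) then count
    else
      let st := frontier.foldl
        (fun (p : List Int × PySem.Set Int) i =>
          (PySem.List.pyGetD lines i []).foldl
            (fun (p : List Int × PySem.Set Int) station =>
              (PySem.List.enumerate lines).foldl
                (fun (p : List Int × PySem.Set Int) e =>
                  if ¬ PySem.Set.contains p.2 e.1 ∧ e.2.contains station then
                    (p.1 ++ [e.1], PySem.Set.add p.2 e.1)
                  else p) p) p)
        ([], visited)
      pvLoopB lines dest fuel st.1 st.2 (count + 1)

def get_metro_num_to_dest2_alt (lines : List (List Int)) (src : Int) (dest : Int) : Int :=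
  if src = dest then 0
  else
    let frontier := ((PySem.List.enumerate lines).filter (fun e => e.2.contains src)).map (fun e => e.1)
    pvLoopB lines dest (lines.length + 1) frontier (PySem.Set.update PySem.Set.empty frontier) 1

-- ===== PRECONDITION & SPEC =====
def Spec_get_metro_num_to_dest2 (lines : List (List Int)) (src : Int) (dest : Int) (out : Int) : Prop := out = get_metro_num_to_dest2_alt lines src dest
instance (lines : List (List Int)) (src : Int) (dest : Int) (out : Int) : Decidable (Spec_get_metro_num_to_dest2 lines src dest out) := by unfold Spec_get_metro_num_to_dest2; infer_instance

-- ===== CLAIM (what is proved, stated in full; the proofs are below) =====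
def Claim_equal_get_metro_num_to_dest2 : Prop := ∀ (lines : List (List Int)) (src : Int) (dest : Int), Dom_get_metro_num_to_dest2 lines src dest → Spec_get_metro_num_to_dest2 lines src dest (get_metro_num_to_dest2 lines src dest)

-- ===== LEMMAS AND PROOFS =====

-- ---- the line graph: indices, adjacency (share a station), balls and spheres ----
def pvStations (lines : List (List Int)) (i : Int) : List Int := PySem.List.pyGetD lines i []

def pvIdxs (lines : List (List Int)) : Finset Int := (Finset.range lines.length).image (fun n => ((n : Nat) : Int))

abbrev pvAdj (lines : List (List Int)) (i j : Int) : Prop := ∃ s ∈ pvStations lines i, s ∈ pvStations lines j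

def pvNbrs (lines : List (List Int)) (X : Finset Int) : Finset Int :=
  (pvIdxs lines).filter (fun j => ∃ i ∈ X, pvAdj lines i j)

def pvStep (lines : List (List Int)) (X : Finset Int) : Finset Int := X ∪ pvNbrs lines X

def pvBall (lines : List (List Int)) (X : Finset Int) : Nat → Finset Int
  | 0 => X
  | (n+1) => pvStep lines (pvBall lines X n)

def pvSphere (lines : List (List Int)) (X : Finset Int) : Nat → Finset Int
  | 0 => X
  | (n+1) => pvBall lines X (n+1) \ pvBall lines X n

def pvLinesThru (lines : List (List Int)) (x : Int) : Finset Int :=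
  (pvIdxs lines).filter (fun j => x ∈ pvStations lines j)

abbrev pvMeets (lines : List (List Int)) (X Y : Finset Int) (n : Nat) : Prop :=
  ((pvBall lines X n) ∩ Y).Nonempty

def pvAns (lines : List (List Int)) (X Y : Finset Int) : Int :=
  if h : ∃ n, n ≤ lines.length ∧ pvMeets lines X Y n then ((Nat.find h : Nat) : Int) + 1 else -1


-- ---- basic ball facts ----
lemma pv_nbrs_mono (lines : List (List Int)) {X Y : Finset Int} (h : X ⊆ Y) :
    pvNbrs lines X ⊆ pvNbrs lines Y := by
  intro j hj
  simp only [pvNbrs, Finset.mem_filter] at hj ⊢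
  obtain ⟨h1, i, hi, h2⟩ := hj
  exact ⟨h1, i, h hi, h2⟩

lemma pv_mem_step (lines : List (List Int)) {X : Finset Int} {x : Int} :
    x ∈ pvStep lines X ↔ x ∈ X ∨ (x ∈ pvIdxs lines ∧ ∃ i ∈ X, pvAdj lines i x) := by
  simp [pvStep, pvNbrs, Finset.mem_union, Finset.mem_filter]

lemma pv_subset_step (lines : List (List Int)) (X : Finset Int) : X ⊆ pvStep lines X :=
  Finset.subset_union_left

lemma pv_step_mono (lines : List (List Int)) {X Y : Finset Int} (h : X ⊆ Y) :
    pvStep lines X ⊆ pvStep lines Y :=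
  Finset.union_subset_union h (pv_nbrs_mono lines h)

lemma pv_step_empty (lines : List (List Int)) : pvStep lines ∅ = ∅ := by
  ext x; simp [pv_mem_step]

lemma pv_nbrs_union (lines : List (List Int)) (X Y : Finset Int) :
    pvNbrs lines (X ∪ Y) = pvNbrs lines X ∪ pvNbrs lines Y := by
  ext j
  simp only [pvNbrs, Finset.mem_union, Finset.mem_filter, Finset.mem_union]
  constructor
  · rintro ⟨h1, i, (hi | hi), h2⟩
    · exact Or.inl ⟨h1, i, hi, h2⟩
    · exact Or.inr ⟨h1, i, hi, h2⟩
  · rintro (⟨h1, i, hi, h2⟩ | ⟨h1, i, hi, h2⟩)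
    · exact ⟨h1, i, Or.inl hi, h2⟩
    · exact ⟨h1, i, Or.inr hi, h2⟩

lemma pv_step_union (lines : List (List Int)) (X Y : Finset Int) :
    pvStep lines (X ∪ Y) = pvStep lines X ∪ pvStep lines Y := by
  simp only [pvStep, pv_nbrs_union]
  ext x; simp only [Finset.mem_union]; tauto

lemma pv_ball_empty (lines : List (List Int)) (n : Nat) : pvBall lines ∅ n = ∅ := by
  induction n with
  | zero => rfl
  | succ n ih => simp [pvBall, ih, pv_step_empty]

lemma pv_ball_union (lines : List (List Int)) (X Y : Finset Int) (n : Nat) :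
    pvBall lines (X ∪ Y) n = pvBall lines X n ∪ pvBall lines Y n := by
  induction n with
  | zero => rfl
  | succ n ih => simp [pvBall, ih, pv_step_union]

lemma pv_ball_succ_subset (lines : List (List Int)) (X : Finset Int) (n : Nat) :
    pvBall lines X n ⊆ pvBall lines X (n+1) :=
  pv_subset_step lines _

lemma pv_ball_mono_seed (lines : List (List Int)) {X Y : Finset Int} (h : X ⊆ Y) (n : Nat) :
    pvBall lines X n ⊆ pvBall lines Y n := by
  induction n with
  | zero => exact h
  | succ n ih => exact pv_step_mono lines ih

lemma pv_mem_ball_iff (lines : List (List Int)) (X : Finset Int) (n : Nat) (x : Int) :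
    x ∈ pvBall lines X n ↔ ∃ i ∈ X, x ∈ pvBall lines {i} n := by
  induction X using Finset.induction_on with
  | empty => simp [pv_ball_empty]
  | insert a s ha ih =>
    have : insert a s = {a} ∪ s := by ext y; simp
    rw [this, pv_ball_union]
    simp only [Finset.mem_union, ih]
    constructor
    · rintro (h | ⟨i, hi, h⟩)
      · exact ⟨a, by simp, h⟩
      · exact ⟨i, by simp [hi], h⟩
    · rintro ⟨i, hi, h⟩
      rcases hi with hi | hi
      · left; rwa [Finset.mem_singleton.mp hi] at h
      · right; exact ⟨i, hi, h⟩

lemma pv_ball_subset_idxs (lines : List (List Int)) {X : Finset Int} (h : X ⊆ pvIdxs lines) (n : Nat) :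
    pvBall lines X n ⊆ pvIdxs lines := by
  induction n with
  | zero => exact h
  | succ n ih =>
    intro x hx
    rcases (pv_mem_step lines).mp hx with hx | hx
    · exact ih hx
    · exact hx.1

lemma pv_ball_add (lines : List (List Int)) (X : Finset Int) (a b : Nat) :
    pvBall lines X (a + b) = pvBall lines (pvBall lines X a) b := by
  induction b with
  | zero => rfl
  | succ b ih => rw [← Nat.add_assoc, pvBall, ih, pvBall]

lemma pv_ball_front (lines : List (List Int)) (X : Finset Int) (n : Nat) :
    pvBall lines X (n+1) = pvBall lines (pvStep lines X) n := by
  have := pv_ball_add lines X 1 n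
  rw [Nat.add_comm 1 n] at this
  exact this

lemma pv_adj_symm (lines : List (List Int)) {i j : Int} (h : pvAdj lines i j) : pvAdj lines j i := by
  obtain ⟨s, h1, h2⟩ := h; exact ⟨s, h2, h1⟩

lemma pv_ball_singleton_symm_aux (lines : List (List Int)) (n : Nat) :
    ∀ i j : Int, i ∈ pvIdxs lines → j ∈ pvIdxs lines →
      j ∈ pvBall lines {i} n → i ∈ pvBall lines {j} n := by
  induction n with
  | zero =>
    intro i j _ _ h
    have hji : j = i := Finset.mem_singleton.mp h
    subst hji
    exact Finset.mem_singleton_self j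
  | succ n ih =>
    intro i j hi hj h
    rcases (pv_mem_step lines).mp h with h | ⟨_, k, hk, hadj⟩
    · exact pv_ball_succ_subset lines _ n (ih i j hi hj h)
    · have hkidx : k ∈ pvIdxs lines :=
        pv_ball_subset_idxs lines (by simp [hi]) n hk
      have hik : i ∈ pvBall lines {k} n := ih i k hi hkidx hk
      rw [pv_ball_front]
      refine pv_ball_mono_seed lines (Y := pvStep lines {j}) ?_ n hik
      intro x hx
      rw [Finset.mem_singleton.mp hx]
      rw [pv_mem_step]
      exact Or.inr ⟨hkidx, j, by simp, pv_adj_symm lines hadj⟩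

lemma pv_ball_singleton_symm (lines : List (List Int)) {i j : Int} (hi : i ∈ pvIdxs lines)
    (hj : j ∈ pvIdxs lines) (n : Nat) :
    j ∈ pvBall lines {i} n ↔ i ∈ pvBall lines {j} n :=
  ⟨pv_ball_singleton_symm_aux lines n i j hi hj, pv_ball_singleton_symm_aux lines n j i hj hi⟩

lemma pv_meet_shift (lines : List (List Int)) {X Y : Finset Int} (hX : X ⊆ pvIdxs lines)
    (hY : Y ⊆ pvIdxs lines) (a b : Nat) :
    (pvBall lines X a ∩ pvBall lines Y b).Nonempty ↔ (pvBall lines X (a + b) ∩ Y).Nonempty := by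
  constructor
  · rintro ⟨z, hz⟩
    rw [Finset.mem_inter] at hz
    obtain ⟨hzX, hzY⟩ := hz
    obtain ⟨y, hy, hzy⟩ := (pv_mem_ball_iff lines Y b z).mp hzY
    have hzidx : z ∈ pvIdxs lines := pv_ball_subset_idxs lines hX a hzX
    have hyz : y ∈ pvBall lines {z} b :=
      (pv_ball_singleton_symm lines (hY hy) hzidx b).mp hzy
    refine ⟨y, Finset.mem_inter.mpr ⟨?_, hy⟩⟩
    rw [pv_ball_add]
    exact pv_ball_mono_seed lines (by simp [hzX]) b hyz
  · rintro ⟨y, hy⟩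
    rw [Finset.mem_inter] at hy
    obtain ⟨hyb, hyY⟩ := hy
    rw [pv_ball_add] at hyb
    obtain ⟨z, hz, hyz⟩ := (pv_mem_ball_iff lines _ b y).mp hyb
    have hzidx : z ∈ pvIdxs lines := pv_ball_subset_idxs lines hX a hz
    have hzy : z ∈ pvBall lines {y} b :=
      (pv_ball_singleton_symm lines hzidx (hY hyY) b).mp hyz
    refine ⟨z, Finset.mem_inter.mpr ⟨hz, ?_⟩⟩
    exact pv_ball_mono_seed lines (by simp [hyY]) b hzy

lemma pv_ball_stab (lines : List (List Int)) {X : Finset Int} {n : Nat}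
    (h : pvBall lines X (n+1) = pvBall lines X n) :
    ∀ m, n ≤ m → pvBall lines X m = pvBall lines X n := by
  intro m hm
  induction m, hm using Nat.le_induction with
  | base => rfl
  | succ m hm ih => rw [pvBall, ih, ← pvBall, h]

lemma pv_card_chain (lines : List (List Int)) (X : Finset Int) (n : Nat)
    (h : ∀ m, m < n → pvBall lines X (m+1) ≠ pvBall lines X m) :
    X.card + n ≤ (pvBall lines X n).card := by
  induction n with
  | zero => simp [pvBall]
  | succ n ih =>
    have h1 : pvBall lines X n ⊂ pvBall lines X (n+1) :=
      Finset.ssubset_iff_subset_ne.mpr ⟨pv_ball_succ_subset lines X n,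
        fun he => h n (by omega) he.symm⟩
    have := Finset.card_lt_card h1
    have := ih (fun m hm => h m (by omega))
    omega

lemma pv_card_idxs (lines : List (List Int)) : (pvIdxs lines).card = lines.length := by
  rw [pvIdxs, Finset.card_image_of_injective _ (fun a b h => by exact_mod_cast h), Finset.card_range]

lemma pv_sphere_nonempty_bound (lines : List (List Int)) {X : Finset Int}
    (hX : X ⊆ pvIdxs lines) {k : Nat} (h : (pvSphere lines X k).Nonempty) :
    k + 1 ≤ lines.length := by
  have hXne : X.Nonempty := by
    rcases Finset.eq_empty_or_nonempty X with he | hne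
    · exfalso; subst he
      rcases k with _ | m
      · simpa [pvSphere] using h
      · simp [pvSphere, pv_ball_empty] at h
    · exact hne
  have hcard : (pvBall lines X k).card ≤ lines.length := by
    rw [← pv_card_idxs lines]
    exact Finset.card_le_card (pv_ball_subset_idxs lines hX k)
  rcases k with _ | m
  · have h1 := Finset.card_pos.mpr hXne
    have hb : pvBall lines X 0 = X := rfl
    rw [hb] at hcard
    omega
  · have hne : pvBall lines X (m+1) ≠ pvBall lines X m := by
      intro he
      rw [pvSphere, he] at h
      simp at h
    have hchain : ∀ l, l < m + 1 → pvBall lines X (l+1) ≠ pvBall lines X l := by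
      intro l hl he
      exact hne (by
        have := pv_ball_stab lines he
        rw [this (m+1) (by omega), this m (by omega)])
    have := pv_card_chain lines X (m+1) hchain
    have := Finset.card_pos.mpr hXne
    omega

lemma pv_no_meets_of_sphere_empty (lines : List (List Int)) {X Y : Finset Int} {a b : Nat}
    (he : pvSphere lines X a = ∅) (hnm : ∀ n, n < a + b → ¬ pvMeets lines X Y n) :
    ∀ n, ¬ pvMeets lines X Y n := by
  rcases a with _ | m
  · have hX : X = ∅ := he
    intro n hn
    rw [pvMeets, hX, pv_ball_empty] at hn
    simp at hn
  · have hstab : pvBall lines X (m+1) = pvBall lines X m := by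
      have hsub := pv_ball_succ_subset lines X m
      have := Finset.sdiff_eq_empty_iff_subset.mp he
      exact Finset.Subset.antisymm this hsub
    intro n hn
    rcases Nat.lt_or_ge n (m+1) with h' | h'
    · exact hnm n (by omega) hn
    · have := pv_ball_stab lines hstab n (by omega)
      rw [pvMeets, this] at hn
      exact hnm m (by omega) hn

lemma pv_meets_symm (lines : List (List Int)) {X Y : Finset Int} (hX : X ⊆ pvIdxs lines)
    (hY : Y ⊆ pvIdxs lines) (n : Nat) :
    pvMeets lines X Y n ↔ pvMeets lines Y X n := by
  have h1 := pv_meet_shift lines hX hY 0 n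
  have h2 : pvBall lines X 0 = X := rfl
  rw [Nat.zero_add] at h1
  rw [pvMeets, ← h1, h2, Finset.inter_comm]

lemma pv_ans_of_meets (lines : List (List Int)) {X Y : Finset Int} (hX : X ⊆ pvIdxs lines)
    {k : Nat} (hmin : ∀ n, n < k → ¬ pvMeets lines X Y n) (hk : pvMeets lines X Y k) :
    pvAns lines X Y = (k : Int) + 1 := by
  have hkL : k ≤ lines.length := by
    rcases k with _ | m
    · omega
    · have hne : pvBall lines X (m+1) ≠ pvBall lines X m := by
        intro he
        exact hmin m (by omega) (by rwa [pvMeets, ← he])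
      have hsne : (pvSphere lines X (m+1)).Nonempty := by
        rw [pvSphere]
        rcases Finset.eq_empty_or_nonempty (pvBall lines X (m+1) \ pvBall lines X m) with he | hne2
        · exact absurd (Finset.Subset.antisymm (Finset.sdiff_eq_empty_iff_subset.mp he)
            (pv_ball_succ_subset lines X m)) hne
        · exact hne2
      have := pv_sphere_nonempty_bound lines hX hsne
      omega
  rw [pvAns]
  rw [dif_pos ⟨k, hkL, hk⟩]
  congr 2
  rw [Nat.find_eq_iff]
  exact ⟨⟨hkL, hk⟩, fun n hn h => hmin n hn h.2⟩

lemma pv_ans_of_no_meets (lines : List (List Int)) {X Y : Finset Int}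
    (h : ∀ n, ¬ pvMeets lines X Y n) : pvAns lines X Y = -1 := by
  rw [pvAns, dif_neg]
  rintro ⟨n, _, hn⟩
  exact h n hn

lemma pv_ans_symm (lines : List (List Int)) {X Y : Finset Int} (hX : X ⊆ pvIdxs lines)
    (hY : Y ⊆ pvIdxs lines) : pvAns lines X Y = pvAns lines Y X := by
  rcases Classical.em (∃ n, pvMeets lines X Y n) with hex | hno
  · have hm : pvMeets lines X Y (Nat.find hex) := Nat.find_spec hex
    have hminm : ∀ l, l < Nat.find hex → ¬ pvMeets lines X Y l := fun l hl => Nat.find_min hex hl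
    set m := Nat.find hex with hmdef
    rw [pv_ans_of_meets lines hX hminm hm,
        pv_ans_of_meets lines hY (fun l hl h => hminm l hl ((pv_meets_symm lines hX hY l).mpr h))
          ((pv_meets_symm lines hX hY m).mp hm)]
  · have hno' : ∀ n, ¬ pvMeets lines X Y n := fun n h => hno ⟨n, h⟩
    rw [pv_ans_of_no_meets lines hno',
        pv_ans_of_no_meets lines (fun n h => hno' n ((pv_meets_symm lines hX hY n).mpr h))]

lemma pv_nbrs_sphere (lines : List (List Int)) (X : Finset Int) (a : Nat) :
    pvNbrs lines (pvSphere lines X a) \ pvBall lines X a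
      = pvNbrs lines (pvBall lines X a) \ pvBall lines X a := by
  apply Finset.Subset.antisymm
  · refine Finset.sdiff_subset_sdiff (pv_nbrs_mono lines ?_) (Finset.Subset.refl _)
    rcases a with _ | m
    · exact Finset.Subset.refl _
    · exact Finset.sdiff_subset
  · intro j hj
    rw [Finset.mem_sdiff] at hj ⊢
    obtain ⟨hjn, hjo⟩ := hj
    refine ⟨?_, hjo⟩
    rw [pvNbrs, Finset.mem_filter] at hjn ⊢
    obtain ⟨hidx, i, hi, hadj⟩ := hjn
    refine ⟨hidx, i, ?_, hadj⟩
    rcases a with _ | m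
    · exact hi
    · rw [pvSphere, Finset.mem_sdiff]
      refine ⟨hi, fun him => hjo ?_⟩
      rw [pvBall, pv_mem_step]
      exact Or.inr ⟨hidx, i, him, hadj⟩

lemma pv_sphere_succ (lines : List (List Int)) (X : Finset Int) (a : Nat) :
    pvSphere lines X (a+1) = pvNbrs lines (pvSphere lines X a) \ pvBall lines X a := by
  rw [pv_nbrs_sphere, pvSphere, pvBall, pvStep]
  ext j
  simp only [Finset.mem_sdiff, Finset.mem_union]
  tauto

lemma pv_ball_succ_sphere (lines : List (List Int)) (X : Finset Int) (a : Nat) :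
    pvBall lines X (a+1) = pvBall lines X a ∪ pvNbrs lines (pvSphere lines X a) := by
  have h := pv_nbrs_sphere lines X a
  rw [pvBall, pvStep]
  ext j
  simp only [Finset.mem_union]
  constructor
  · rintro (h1 | h1)
    · exact Or.inl h1
    · by_cases hj : j ∈ pvBall lines X a
      · exact Or.inl hj
      · right
        have : j ∈ pvNbrs lines (pvSphere lines X a) \ pvBall lines X a := by
          rw [h, Finset.mem_sdiff]; exact ⟨h1, hj⟩
        exact (Finset.mem_sdiff.mp this).1
  · rintro (h1 | h1)
    · exact Or.inl h1
    · by_cases hj : j ∈ pvBall lines X a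
      · exact Or.inl hj
      · right
        have : j ∈ pvNbrs lines (pvSphere lines X a) \ pvBall lines X a :=
          Finset.mem_sdiff.mpr ⟨h1, hj⟩
        rw [h, Finset.mem_sdiff] at this
        exact this.1


-- ---- characterization of A's station graph ----
lemma pv_graph_line_fold_mem (i : Int) (sts : List Int) :
    ∀ (g : PySem.Dict Int (PySem.Set Int)) (s j : Int),
      j ∈ ((sts.foldl (fun g station =>
              g.modify station PySem.Set.empty (fun t => PySem.Set.add t i)) g).getD s PySem.Set.empty)
        ↔ j ∈ g.getD s PySem.Set.empty ∨ (j = i ∧ s ∈ sts) := by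
  induction sts with
  | nil => intro g s j; simp
  | cons st rest ih =>
    intro g s j
    rw [List.foldl_cons, ih]
    rw [PySem.Dict.getD_modify]
    by_cases hs : s = st
    · subst hs
      rw [if_pos rfl, PySem.Set.mem_add]
      simp only [List.mem_cons]
      tauto
    · rw [if_neg hs]
      simp only [List.mem_cons]
      tauto

lemma pv_graph_line_fold_nodup (i : Int) (sts : List Int) :
    ∀ (g : PySem.Dict Int (PySem.Set Int)),
      (∀ s, (g.getD s PySem.Set.empty).Nodup) →
      ∀ s, ((sts.foldl (fun g station =>
              g.modify station PySem.Set.empty (fun t => PySem.Set.add t i)) g).getD s PySem.Set.empty).Nodup := by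
  induction sts with
  | nil => intro g hg s; exact hg s
  | cons st rest ih =>
    intro g hg s
    rw [List.foldl_cons]
    refine ih _ (fun s' => ?_) s
    rw [PySem.Dict.getD_modify]
    by_cases hs : s' = st
    · rw [if_pos hs]; exact PySem.Set.nodup_add _ _ (hg st)
    · rw [if_neg hs]; exact hg s'

lemma pv_graph_fold_mem (es : List (Int × List Int)) :
    ∀ (g : PySem.Dict Int (PySem.Set Int)) (s j : Int),
      j ∈ ((es.foldl (fun g p => p.2.foldl
              (fun g station => g.modify station PySem.Set.empty (fun t => PySem.Set.add t p.1)) g) g).getD s PySem.Set.empty)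
        ↔ j ∈ g.getD s PySem.Set.empty ∨ ∃ p ∈ es, j = p.1 ∧ s ∈ p.2 := by
  induction es with
  | nil => intro g s j; simp
  | cons e rest ih =>
    intro g s j
    rw [List.foldl_cons, ih, pv_graph_line_fold_mem]
    simp only [List.mem_cons]
    constructor
    · rintro (⟨h | ⟨h1, h2⟩⟩ | ⟨p, hp, h1, h2⟩)
      · exact Or.inl h
      · exact Or.inr ⟨e, Or.inl rfl, h1, h2⟩
      · exact Or.inr ⟨p, Or.inr hp, h1, h2⟩
    · rintro (h | ⟨p, (hp | hp), h1, h2⟩)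
      · exact Or.inl (Or.inl h)
      · subst hp; exact Or.inl (Or.inr ⟨h1, h2⟩)
      · exact Or.inr ⟨p, hp, h1, h2⟩

lemma pv_graph_fold_nodup (es : List (Int × List Int)) :
    ∀ (g : PySem.Dict Int (PySem.Set Int)),
      (∀ s, (g.getD s PySem.Set.empty).Nodup) →
      ∀ s, ((es.foldl (fun g p => p.2.foldl
              (fun g station => g.modify station PySem.Set.empty (fun t => PySem.Set.add t p.1)) g) g).getD s PySem.Set.empty).Nodup := by
  induction es with
  | nil => intro g hg s; exact hg s
  | cons e rest ih =>
    intro g hg s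
    rw [List.foldl_cons]
    exact ih _ (pv_graph_line_fold_nodup e.1 e.2 g hg) s

lemma pv_exists_enumerate (lines : List (List Int)) (s j : Int) :
    (∃ p ∈ PySem.List.enumerate lines, j = p.1 ∧ s ∈ p.2) ↔ j ∈ pvLinesThru lines s := by
  constructor
  · rintro ⟨p, hp, h1, h2⟩
    rw [PySem.List.mem_enumerate_iff] at hp
    obtain ⟨k, hk, hpk⟩ := hp
    subst hpk
    simp only at h1 h2
    rw [pvLinesThru, Finset.mem_filter]
    constructor
    · rw [pvIdxs, Finset.mem_image]
      exact ⟨k, Finset.mem_range.mpr hk, by omega⟩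
    · have : pvStations lines j = lines[k] := by
        rw [pvStations, h1]
        rw [show ((0 : Int) + (k : Int)) = ((k : Nat) : Int) by omega]
        rw [PySem.List.pyGetD_natCast]
        exact List.getD_eq_getElem lines [] hk
      rw [this]; exact h2
  · intro h
    rw [pvLinesThru, Finset.mem_filter, pvIdxs, Finset.mem_image] at h
    obtain ⟨⟨k, hk, hkj⟩, h2⟩ := h
    rw [Finset.mem_range] at hk
    refine ⟨((0 : Int) + (k : Int), lines[k]), ?_, by omega, ?_⟩
    · rw [PySem.List.mem_enumerate_iff]
      exact ⟨k, hk, rfl⟩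
    · have : pvStations lines j = lines[k] := by
        rw [pvStations, ← hkj, PySem.List.pyGetD_natCast]
        exact List.getD_eq_getElem lines [] hk
      rw [← this]; exact h2

lemma pv_graphA_mem (lines : List (List Int)) (s j : Int) :
    j ∈ (pvGraphA lines).getD s PySem.Set.empty ↔ j ∈ pvLinesThru lines s := by
  rw [pvGraphA, pv_graph_fold_mem]
  rw [← pv_exists_enumerate lines s j]
  simp [PySem.Dict.getD_empty, PySem.Set.empty]

lemma pv_graphA_toFinset (lines : List (List Int)) (s : Int) :
    ((pvGraphA lines).getD s PySem.Set.empty).toFinset = pvLinesThru lines s := by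
  ext j
  rw [List.mem_toFinset, pv_graphA_mem]

lemma pv_graphA_nodup (lines : List (List Int)) (s : Int) :
    ((pvGraphA lines).getD s PySem.Set.empty).Nodup := by
  rw [pvGraphA]
  exact pv_graph_fold_nodup _ _ (fun s' => by simp [PySem.Dict.getD_empty, PySem.Set.empty]) s

-- ---- generic state invariant for the expansion folds ----
def pvInv (v : PySem.Set Int) (out : List Int) : Prop :=
  v.Nodup ∧ out.Nodup ∧ ∀ x ∈ out, x ∈ v

lemma pv_union_sdiff_comp (o A B v : Finset Int) :
    (o ∪ (A \ v)) ∪ (B \ (v ∪ A)) = o ∪ ((A ∪ B) \ v) := by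
  ext x
  simp only [Finset.mem_union, Finset.mem_sdiff]
  tauto


def pvThruU (lines : List (List Int)) : List Int → Finset Int
  | [] => ∅
  | st :: rest => pvLinesThru lines st ∪ pvThruU lines rest

lemma pv_mem_thruU (lines : List (List Int)) (sts : List Int) (j : Int) :
    j ∈ pvThruU lines sts ↔ ∃ st ∈ sts, j ∈ pvLinesThru lines st := by
  induction sts with
  | nil => simp [pvThruU]
  | cons st rest ih => simp [pvThruU, ih]

lemma pv_thruU_stations (lines : List (List Int)) (r : Int) :
    pvThruU lines (pvStations lines r) = pvNbrs lines {r} := by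
  ext j
  rw [pv_mem_thruU]
  simp only [pvNbrs, pvLinesThru, Finset.mem_filter, Finset.mem_singleton, pvAdj]
  constructor
  · rintro ⟨st, hst, hidx, hmem⟩
    exact ⟨hidx, r, rfl, st, hst, hmem⟩
  · rintro ⟨hidx, i, rfl, st, hst, hmem⟩
    exact ⟨st, hst, hidx, hmem⟩

lemma pv_foldA_inner (cand : List Int) :
    ∀ v out, pvInv v out →
      pvInv (cand.foldl (fun (q : PySem.Set Int × List Int) nr =>
            if PySem.Set.contains q.1 nr then q else (PySem.Set.add q.1 nr, q.2 ++ [nr])) (v, out)).1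
            (cand.foldl (fun (q : PySem.Set Int × List Int) nr =>
            if PySem.Set.contains q.1 nr then q else (PySem.Set.add q.1 nr, q.2 ++ [nr])) (v, out)).2 ∧
      ((cand.foldl (fun (q : PySem.Set Int × List Int) nr =>
            if PySem.Set.contains q.1 nr then q else (PySem.Set.add q.1 nr, q.2 ++ [nr])) (v, out)).1).toFinset
          = v.toFinset ∪ cand.toFinset ∧
      ((cand.foldl (fun (q : PySem.Set Int × List Int) nr =>
            if PySem.Set.contains q.1 nr then q else (PySem.Set.add q.1 nr, q.2 ++ [nr])) (v, out)).2).toFinset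
          = out.toFinset ∪ (cand.toFinset \ v.toFinset) := by
  induction cand with
  | nil => intro v out hinv; refine ⟨hinv, by simp, by simp⟩
  | cons c rest ih =>
    intro v out hinv
    obtain ⟨hv, hout, hsub⟩ := hinv
    rw [List.foldl_cons]
    by_cases hc : c ∈ v
    · have hcont : PySem.Set.contains v c = true := (PySem.Set.contains_iff v c).mpr hc
      rw [if_pos hcont]
      obtain ⟨h1, h2, h3⟩ := ih v out ⟨hv, hout, hsub⟩
      refine ⟨h1, ?_, ?_⟩
      · rw [h2]; ext x
        simp only [Finset.mem_union, List.mem_toFinset, List.toFinset_cons, Finset.mem_insert]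
        rcases eq_or_ne x c with rfl | hne <;> tauto
      · rw [h3]; ext x
        simp only [Finset.mem_union, Finset.mem_sdiff, List.mem_toFinset, List.toFinset_cons,
          Finset.mem_insert]
        rcases eq_or_ne x c with rfl | hne <;> tauto
    · have hcont : ¬ (PySem.Set.contains v c = true) := fun h => hc ((PySem.Set.contains_iff v c).mp h)
      rw [if_neg hcont]
      have hveq : PySem.Set.add v c = v ++ [c] := PySem.Set.add_of_not_mem hc
      have hinv' : pvInv (PySem.Set.add v c) (out ++ [c]) := by
        refine ⟨PySem.Set.nodup_add _ _ hv, ?_, ?_⟩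
        · have hcout : c ∉ out := fun hcx => hc (hsub c hcx)
          simp [List.nodup_append, hout]
          intro a ha hac
          exact hcout (hac ▸ ha)
        · intro x hx
          rw [List.mem_append, List.mem_singleton] at hx
          rw [PySem.Set.mem_add]
          rcases hx with hx | rfl
          · exact Or.inl (hsub x hx)
          · exact Or.inr rfl
      obtain ⟨h1, h2, h3⟩ := ih _ _ hinv'
      have haddfin : (PySem.Set.add v c).toFinset = insert c v.toFinset := by
        rw [hveq]; ext x
        simp only [List.mem_toFinset, List.mem_append, List.mem_singleton, Finset.mem_insert]
        tauto
      have houtfin : (out ++ [c]).toFinset = insert c out.toFinset := by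
        ext x
        simp only [List.mem_toFinset, List.mem_append, List.mem_singleton, Finset.mem_insert]
        tauto
      refine ⟨h1, ?_, ?_⟩
      · rw [h2, haddfin]; ext x
        simp only [Finset.mem_union, Finset.mem_insert, List.mem_toFinset, List.toFinset_cons]
        tauto
      · rw [h3, haddfin, houtfin]; ext x
        simp only [Finset.mem_union, Finset.mem_sdiff, Finset.mem_insert, List.mem_toFinset,
          List.toFinset_cons]
        rcases eq_or_ne x c with rfl | hne <;> tauto

lemma pv_foldA_route (lines : List (List Int)) (sts : List Int) :
    ∀ v out, pvInv v out →
      pvInv (sts.foldl (fun (q : PySem.Set Int × List Int) station =>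
            (PySem.Dict.getD (pvGraphA lines) station PySem.Set.empty).foldl
              (fun (q : PySem.Set Int × List Int) nr =>
                if PySem.Set.contains q.1 nr then q else (PySem.Set.add q.1 nr, q.2 ++ [nr])) q) (v, out)).1
          (sts.foldl (fun (q : PySem.Set Int × List Int) station =>
            (PySem.Dict.getD (pvGraphA lines) station PySem.Set.empty).foldl
              (fun (q : PySem.Set Int × List Int) nr =>
                if PySem.Set.contains q.1 nr then q else (PySem.Set.add q.1 nr, q.2 ++ [nr])) q) (v, out)).2 ∧
      ((sts.foldl (fun (q : PySem.Set Int × List Int) station =>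
            (PySem.Dict.getD (pvGraphA lines) station PySem.Set.empty).foldl
              (fun (q : PySem.Set Int × List Int) nr =>
                if PySem.Set.contains q.1 nr then q else (PySem.Set.add q.1 nr, q.2 ++ [nr])) q) (v, out)).1).toFinset
          = v.toFinset ∪ pvThruU lines sts ∧
      ((sts.foldl (fun (q : PySem.Set Int × List Int) station =>
            (PySem.Dict.getD (pvGraphA lines) station PySem.Set.empty).foldl
              (fun (q : PySem.Set Int × List Int) nr =>
                if PySem.Set.contains q.1 nr then q else (PySem.Set.add q.1 nr, q.2 ++ [nr])) q) (v, out)).2).toFinset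
          = out.toFinset ∪ (pvThruU lines sts \ v.toFinset) := by
  induction sts with
  | nil => intro v out hinv; refine ⟨hinv, by simp [pvThruU], by simp [pvThruU]⟩
  | cons st rest ih =>
    intro v out hinv
    rw [List.foldl_cons]
    obtain ⟨h1, h2, h3⟩ := pv_foldA_inner (PySem.Dict.getD (pvGraphA lines) st PySem.Set.empty) v out hinv
    rw [pv_graphA_toFinset] at h2 h3
    obtain ⟨g1, g2, g3⟩ := ih _ _ h1
    refine ⟨g1, ?_, ?_⟩
    · rw [g2, h2, pvThruU, Finset.union_assoc]
    · rw [g3, h3, h2, pvThruU]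
      exact pv_union_sdiff_comp _ _ _ _


lemma pv_nbrs_empty (lines : List (List Int)) : pvNbrs lines ∅ = ∅ := by
  ext j; simp [pvNbrs]

lemma pv_levelA_meet (lines : List (List Int)) (graph : PySem.Dict Int (PySem.Set Int))
    (v2 : PySem.Set Int) :
    ∀ (fr : List Int) (v : PySem.Set Int) (out : List Int),
      (∃ r ∈ fr, PySem.Set.contains v2 r = true) →
      (pvLevelA lines graph v2 fr v out).1 = true := by
  intro fr
  induction fr with
  | nil => rintro v out ⟨r, hr, _⟩; simp at hr
  | cons r rest ih =>
    rintro v out ⟨r', hr', hc⟩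
    by_cases h : PySem.Set.contains v2 r = true
    · rw [pvLevelA, if_pos h]
    · rw [pvLevelA, if_neg h]
      rcases List.mem_cons.mp hr' with rfl | hmem
      · exact absurd hc h
      · exact ih _ _ ⟨r', hmem, hc⟩

lemma pv_levelA_no_meet (lines : List (List Int)) (v2 : PySem.Set Int) :
    ∀ (fr : List Int) (v : PySem.Set Int) (out : List Int), pvInv v out →
      (∀ r ∈ fr, ¬ (PySem.Set.contains v2 r = true)) →
      ∃ v' out', pvLevelA lines (pvGraphA lines) v2 fr v out = (false, v', out') ∧ pvInv v' out' ∧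
        v'.toFinset = v.toFinset ∪ pvNbrs lines fr.toFinset ∧
        out'.toFinset = out.toFinset ∪ (pvNbrs lines fr.toFinset \ v.toFinset) := by
  intro fr
  induction fr with
  | nil =>
    intro v out hinv _
    exact ⟨v, out, rfl, hinv, by simp [pv_nbrs_empty], by simp [pv_nbrs_empty]⟩
  | cons r rest ih =>
    intro v out hinv hnm
    rw [pvLevelA, if_neg (hnm r (List.mem_cons_self ..))]
    obtain ⟨h1, h2, h3⟩ := pv_foldA_route lines (PySem.List.pyGetD lines r []) v out hinv
    obtain ⟨v', out', heq, hinv', hv', hout'⟩ :=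
      ih _ _ h1 (fun x hx => hnm x (List.mem_cons_of_mem r hx))
    have hT : pvThruU lines (PySem.List.pyGetD lines r []) = pvNbrs lines {r} :=
      pv_thruU_stations lines r
    have hN : pvNbrs lines (r :: rest).toFinset = pvNbrs lines {r} ∪ pvNbrs lines rest.toFinset := by
      rw [List.toFinset_cons, Finset.insert_eq, pv_nbrs_union]
    refine ⟨v', out', heq, hinv', ?_, ?_⟩
    · rw [hv', h2, hT, hN, Finset.union_assoc]
    · rw [hout', h3, h2, hT, hN]
      exact pv_union_sdiff_comp _ _ _ _

-- ---- B-side fold characterizations ----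
def pvESet (station : Int) : List (Int × List Int) → Finset Int
  | [] => ∅
  | e :: rest => (if station ∈ e.2 then {e.1} else ∅) ∪ pvESet station rest

lemma pv_mem_eset (station : Int) (es : List (Int × List Int)) (j : Int) :
    j ∈ pvESet station es ↔ ∃ p ∈ es, j = p.1 ∧ station ∈ p.2 := by
  induction es with
  | nil => simp [pvESet]
  | cons e rest ih =>
    simp only [pvESet, Finset.mem_union, ih, List.mem_cons]
    by_cases h : station ∈ e.2
    · rw [if_pos h]
      simp only [Finset.mem_singleton]
      constructor
      · rintro (rfl | ⟨p, hp, h1, h2⟩)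
        · exact ⟨e, Or.inl rfl, rfl, h⟩
        · exact ⟨p, Or.inr hp, h1, h2⟩
      · rintro ⟨p, (rfl | hp), h1, h2⟩
        · exact Or.inl h1
        · exact Or.inr ⟨p, hp, h1, h2⟩
    · rw [if_neg h]
      simp only [Finset.notMem_empty, false_or]
      constructor
      · rintro ⟨p, hp, h1, h2⟩
        exact ⟨p, Or.inr hp, h1, h2⟩
      · rintro ⟨p, (rfl | hp), h1, h2⟩
        · exact absurd h2 h
        · exact ⟨p, hp, h1, h2⟩

lemma pv_eset_enumerate (lines : List (List Int)) (station : Int) :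
    pvESet station (PySem.List.enumerate lines) = pvLinesThru lines station := by
  ext j
  rw [pv_mem_eset, pv_exists_enumerate]

lemma pv_foldB_inner (station : Int) (es : List (Int × List Int)) :
    ∀ (out : List Int) (vis : PySem.Set Int), pvInv vis out →
      pvInv (es.foldl (fun (p : List Int × PySem.Set Int) e =>
              if ¬ PySem.Set.contains p.2 e.1 ∧ e.2.contains station then
                (p.1 ++ [e.1], PySem.Set.add p.2 e.1) else p) (out, vis)).2
            (es.foldl (fun (p : List Int × PySem.Set Int) e =>
              if ¬ PySem.Set.contains p.2 e.1 ∧ e.2.contains station then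
                (p.1 ++ [e.1], PySem.Set.add p.2 e.1) else p) (out, vis)).1 ∧
      ((es.foldl (fun (p : List Int × PySem.Set Int) e =>
              if ¬ PySem.Set.contains p.2 e.1 ∧ e.2.contains station then
                (p.1 ++ [e.1], PySem.Set.add p.2 e.1) else p) (out, vis)).2).toFinset
          = vis.toFinset ∪ pvESet station es ∧
      ((es.foldl (fun (p : List Int × PySem.Set Int) e =>
              if ¬ PySem.Set.contains p.2 e.1 ∧ e.2.contains station then
                (p.1 ++ [e.1], PySem.Set.add p.2 e.1) else p) (out, vis)).1).toFinset
          = out.toFinset ∪ (pvESet station es \ vis.toFinset) := by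
  induction es with
  | nil => intro out vis hinv; exact ⟨hinv, by simp [pvESet], by simp [pvESet]⟩
  | cons e rest ih =>
    intro out vis hinv
    obtain ⟨hv, hout, hsub⟩ := hinv
    rw [List.foldl_cons]
    by_cases hst : station ∈ e.2
    · by_cases hin : e.1 ∈ vis
      · have hcond : ¬ (¬ PySem.Set.contains vis e.1 ∧ e.2.contains station) := by
          intro hcon
          exact hcon.1 ((PySem.Set.contains_iff vis e.1).mpr hin)
        rw [if_neg hcond]
        obtain ⟨h1, h2, h3⟩ := ih out vis ⟨hv, hout, hsub⟩
        refine ⟨h1, ?_, ?_⟩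
        · rw [h2, pvESet, if_pos hst]
          ext x
          simp only [Finset.mem_union, Finset.mem_singleton, List.mem_toFinset]
          rcases eq_or_ne x e.1 with rfl | hne <;> tauto
        · rw [h3, pvESet, if_pos hst]
          ext x
          simp only [Finset.mem_union, Finset.mem_sdiff, Finset.mem_singleton, List.mem_toFinset]
          rcases eq_or_ne x e.1 with rfl | hne <;> tauto
      · have hcond : (¬ PySem.Set.contains vis e.1 ∧ e.2.contains station) := by
          constructor
          · intro h; exact hin ((PySem.Set.contains_iff vis e.1).mp h)
          · exact List.elem_eq_true_of_mem hst
        rw [if_pos hcond]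
        have hinv' : pvInv (PySem.Set.add vis e.1) (out ++ [e.1]) := by
          refine ⟨PySem.Set.nodup_add _ _ hv, ?_, ?_⟩
          · have hcout : e.1 ∉ out := fun hcx => hin (hsub e.1 hcx)
            simp [List.nodup_append, hout]
            intro a ha hac
            exact hcout (hac ▸ ha)
          · intro x hx
            rw [List.mem_append, List.mem_singleton] at hx
            rw [PySem.Set.mem_add]
            rcases hx with hx | rfl
            · exact Or.inl (hsub x hx)
            · exact Or.inr rfl
        obtain ⟨h1, h2, h3⟩ := ih _ _ hinv'
        have haddfin : (PySem.Set.add vis e.1).toFinset = insert e.1 vis.toFinset := by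
          rw [PySem.Set.add_of_not_mem hin]; ext x
          simp only [List.mem_toFinset, List.mem_append, List.mem_singleton, Finset.mem_insert]
          tauto
        have houtfin : (out ++ [e.1]).toFinset = insert e.1 out.toFinset := by
          ext x
          simp only [List.mem_toFinset, List.mem_append, List.mem_singleton, Finset.mem_insert]
          tauto
        refine ⟨h1, ?_, ?_⟩
        · rw [h2, haddfin, pvESet, if_pos hst]
          ext x
          simp only [Finset.mem_union, Finset.mem_insert, Finset.mem_singleton, List.mem_toFinset]
          tauto
        · rw [h3, haddfin, houtfin, pvESet, if_pos hst]
          ext x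
          simp only [Finset.mem_union, Finset.mem_sdiff, Finset.mem_insert, Finset.mem_singleton,
            List.mem_toFinset]
          have hcv : e.1 ∉ vis := hin
          rcases eq_or_ne x e.1 with rfl | hne <;> tauto
    · have hcond : ¬ (¬ PySem.Set.contains vis e.1 ∧ e.2.contains station) := by
        rintro ⟨_, h2⟩
        exact hst (List.mem_of_elem_eq_true h2)
      rw [if_neg hcond]
      obtain ⟨h1, h2, h3⟩ := ih out vis ⟨hv, hout, hsub⟩
      rw [pvESet, if_neg hst]
      exact ⟨h1, by rw [h2]; simp, by rw [h3]; simp⟩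

lemma pv_foldB_route (lines : List (List Int)) (sts : List Int) :
    ∀ (out : List Int) (vis : PySem.Set Int), pvInv vis out →
      pvInv (sts.foldl (fun (p : List Int × PySem.Set Int) station =>
              (PySem.List.enumerate lines).foldl
                (fun (p : List Int × PySem.Set Int) e =>
                  if ¬ PySem.Set.contains p.2 e.1 ∧ e.2.contains station then
                    (p.1 ++ [e.1], PySem.Set.add p.2 e.1) else p) p) (out, vis)).2
            (sts.foldl (fun (p : List Int × PySem.Set Int) station =>
              (PySem.List.enumerate lines).foldl
                (fun (p : List Int × PySem.Set Int) e =>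
                  if ¬ PySem.Set.contains p.2 e.1 ∧ e.2.contains station then
                    (p.1 ++ [e.1], PySem.Set.add p.2 e.1) else p) p) (out, vis)).1 ∧
      ((sts.foldl (fun (p : List Int × PySem.Set Int) station =>
              (PySem.List.enumerate lines).foldl
                (fun (p : List Int × PySem.Set Int) e =>
                  if ¬ PySem.Set.contains p.2 e.1 ∧ e.2.contains station then
                    (p.1 ++ [e.1], PySem.Set.add p.2 e.1) else p) p) (out, vis)).2).toFinset
          = vis.toFinset ∪ pvThruU lines sts ∧
      ((sts.foldl (fun (p : List Int × PySem.Set Int) station =>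
              (PySem.List.enumerate lines).foldl
                (fun (p : List Int × PySem.Set Int) e =>
                  if ¬ PySem.Set.contains p.2 e.1 ∧ e.2.contains station then
                    (p.1 ++ [e.1], PySem.Set.add p.2 e.1) else p) p) (out, vis)).1).toFinset
          = out.toFinset ∪ (pvThruU lines sts \ vis.toFinset) := by
  induction sts with
  | nil => intro out vis hinv; exact ⟨hinv, by simp [pvThruU], by simp [pvThruU]⟩
  | cons st rest ih =>
    intro out vis hinv
    rw [List.foldl_cons]
    obtain ⟨h1, h2, h3⟩ := pv_foldB_inner st (PySem.List.enumerate lines) out vis hinv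
    rw [pv_eset_enumerate] at h2 h3
    obtain ⟨g1, g2, g3⟩ := ih _ _ h1
    refine ⟨g1, ?_, ?_⟩
    · rw [g2, h2, pvThruU, Finset.union_assoc]
    · rw [g3, h3, h2, pvThruU]
      exact pv_union_sdiff_comp _ _ _ _

lemma pv_foldB_frontier (lines : List (List Int)) (fr : List Int) :
    ∀ (out : List Int) (vis : PySem.Set Int), pvInv vis out →
      pvInv (fr.foldl (fun (p : List Int × PySem.Set Int) i =>
              (PySem.List.pyGetD lines i []).foldl
                (fun (p : List Int × PySem.Set Int) station =>
                  (PySem.List.enumerate lines).foldl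
                    (fun (p : List Int × PySem.Set Int) e =>
                      if ¬ PySem.Set.contains p.2 e.1 ∧ e.2.contains station then
                        (p.1 ++ [e.1], PySem.Set.add p.2 e.1) else p) p) p) (out, vis)).2
            (fr.foldl (fun (p : List Int × PySem.Set Int) i =>
              (PySem.List.pyGetD lines i []).foldl
                (fun (p : List Int × PySem.Set Int) station =>
                  (PySem.List.enumerate lines).foldl
                    (fun (p : List Int × PySem.Set Int) e =>
                      if ¬ PySem.Set.contains p.2 e.1 ∧ e.2.contains station then
                        (p.1 ++ [e.1], PySem.Set.add p.2 e.1) else p) p) p) (out, vis)).1 ∧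
      ((fr.foldl (fun (p : List Int × PySem.Set Int) i =>
              (PySem.List.pyGetD lines i []).foldl
                (fun (p : List Int × PySem.Set Int) station =>
                  (PySem.List.enumerate lines).foldl
                    (fun (p : List Int × PySem.Set Int) e =>
                      if ¬ PySem.Set.contains p.2 e.1 ∧ e.2.contains station then
                        (p.1 ++ [e.1], PySem.Set.add p.2 e.1) else p) p) p) (out, vis)).2).toFinset
          = vis.toFinset ∪ pvNbrs lines fr.toFinset ∧
      ((fr.foldl (fun (p : List Int × PySem.Set Int) i =>
              (PySem.List.pyGetD lines i []).foldl
                (fun (p : List Int × PySem.Set Int) station =>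
                  (PySem.List.enumerate lines).foldl
                    (fun (p : List Int × PySem.Set Int) e =>
                      if ¬ PySem.Set.contains p.2 e.1 ∧ e.2.contains station then
                        (p.1 ++ [e.1], PySem.Set.add p.2 e.1) else p) p) p) (out, vis)).1).toFinset
          = out.toFinset ∪ (pvNbrs lines fr.toFinset \ vis.toFinset) := by
  induction fr with
  | nil => intro out vis hinv; exact ⟨hinv, by simp [pv_nbrs_empty], by simp [pv_nbrs_empty]⟩
  | cons r rest ih =>
    intro out vis hinv
    rw [List.foldl_cons]
    obtain ⟨h1, h2, h3⟩ := pv_foldB_route lines (PySem.List.pyGetD lines r []) out vis hinv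
    have hT : pvThruU lines (PySem.List.pyGetD lines r []) = pvNbrs lines {r} :=
      pv_thruU_stations lines r
    rw [hT] at h2 h3
    have hN : pvNbrs lines (r :: rest).toFinset = pvNbrs lines {r} ∪ pvNbrs lines rest.toFinset := by
      rw [List.toFinset_cons, Finset.insert_eq, pv_nbrs_union]
    obtain ⟨g1, g2, g3⟩ := ih _ _ h1
    refine ⟨g1, ?_, ?_⟩
    · rw [g2, h2, hN, Finset.union_assoc]
    · rw [g3, h3, h2, hN]
      exact pv_union_sdiff_comp _ _ _ _


lemma pv_sphere_subset_ball (lines : List (List Int)) (X : Finset Int) (a : Nat) :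
    pvSphere lines X a ⊆ pvBall lines X a := by
  cases a with
  | zero => exact Finset.Subset.refl _
  | succ m => exact Finset.sdiff_subset

lemma pv_ball_diff_sphere (lines : List (List Int)) (X : Finset Int) (m : Nat) {z : Int}
    (hz : z ∈ pvBall lines X (m+1)) (hns : z ∉ pvSphere lines X (m+1)) :
    z ∈ pvBall lines X m := by
  rw [pvSphere, Finset.mem_sdiff] at hns
  tauto

lemma pv_no_meet_step (lines : List (List Int)) {X Y : Finset Int} (hX : X ⊆ pvIdxs lines)
    (hY : Y ⊆ pvIdxs lines) {a b : Nat}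
    (hnm : ∀ n, n < a + b → ¬ pvMeets lines X Y n)
    (hdisj : ∀ z, z ∈ pvSphere lines X a → z ∈ pvBall lines Y b → False) :
    ∀ n, n < a + 1 + b → ¬ pvMeets lines X Y n := by
  intro n hn
  rcases Nat.lt_or_ge n (a + b) with h | h
  · exact hnm n h
  · have hnab : n = a + b := by omega
    subst hnab
    intro hM
    obtain ⟨z, hz⟩ := (pv_meet_shift lines hX hY a b).mpr hM
    rw [Finset.mem_inter] at hz
    obtain ⟨hza, hzb⟩ := hz
    by_cases hs : z ∈ pvSphere lines X a
    · exact hdisj z hs hzb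
    · cases a with
      | zero => exact hs hza
      | succ m =>
        have hzm : z ∈ pvBall lines X m := pv_ball_diff_sphere lines X m hza hs
        exact hnm (m + b) (by omega)
          ((pv_meet_shift lines hX hY m b).mp ⟨z, Finset.mem_inter.mpr ⟨hzm, hzb⟩⟩)

lemma pv_ans_neg_left (lines : List (List Int)) {X Y : Finset Int} {a b : Nat}
    (he : pvSphere lines X a = ∅) (hnm : ∀ n, n < a + b → ¬ pvMeets lines X Y n) :
    pvAns lines X Y = -1 :=
  pv_ans_of_no_meets lines (pv_no_meets_of_sphere_empty lines he hnm)

lemma pv_ans_neg_right (lines : List (List Int)) {X Y : Finset Int} (hX : X ⊆ pvIdxs lines)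
    (hY : Y ⊆ pvIdxs lines) {a b : Nat}
    (he : pvSphere lines Y b = ∅) (hnm : ∀ n, n < a + b → ¬ pvMeets lines X Y n) :
    pvAns lines X Y = -1 := by
  rw [pv_ans_symm lines hX hY]
  refine pv_ans_neg_left lines (a := b) (b := a) he ?_
  intro n hn hM
  exact hnm n (by omega) ((pv_meets_symm lines hX hY n).mpr hM)

lemma pv_loopA_step (lines : List (List Int)) (fuel : Nat)
    (ih : ∀ (X Y : Finset Int), X ⊆ pvIdxs lines → Y ⊆ pvIdxs lines →
      ∀ (a b : Nat) (q1 : List Int) (v1 : PySem.Set Int) (q2 : List Int) (v2 : PySem.Set Int),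
        q1.Nodup → q1.toFinset = pvSphere lines X a →
        v1.Nodup → v1.toFinset = pvBall lines X a →
        q2.Nodup → q2.toFinset = pvSphere lines Y b →
        v2.Nodup → v2.toFinset = pvBall lines Y b →
        (∀ n, n < a + b → ¬ pvMeets lines X Y n) →
        2 * lines.length + 2 ≤ fuel + a + b →
        pvLoopA lines (pvGraphA lines) fuel q1 v1 q2 v2 ((a : Int) + (b : Int)) = pvAns lines X Y) :
    ∀ (X Y : Finset Int), X ⊆ pvIdxs lines → Y ⊆ pvIdxs lines →
    ∀ (a b : Nat) (q1 : List Int) (v1 : PySem.Set Int) (q2 : List Int) (v2 : PySem.Set Int),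
      q1.Nodup → q1.toFinset = pvSphere lines X a →
      v1.Nodup → v1.toFinset = pvBall lines X a →
      q2.Nodup → q2.toFinset = pvSphere lines Y b →
      v2.Nodup → v2.toFinset = pvBall lines Y b →
      (∀ n, n < a + b → ¬ pvMeets lines X Y n) →
      2 * lines.length + 2 ≤ (fuel + 1) + a + b →
      (match pvLevelA lines (pvGraphA lines) v2 q1 v1 [] with
       | (true, _, _) => ((a : Int) + (b : Int)) + 1
       | (false, v1', q1') =>
           pvLoopA lines (pvGraphA lines) fuel q1' v1' q2 v2 (((a : Int) + (b : Int)) + 1))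
        = pvAns lines X Y := by
  intro X Y hX hY a b q1 v1 q2 v2 hq1nd hq1 hv1nd hv1 hq2nd hq2 hv2nd hv2 hnm hfuel
  by_cases hmeet : ∃ r ∈ q1, PySem.Set.contains v2 r = true
  · have hflag := pv_levelA_meet lines (pvGraphA lines) v2 q1 v1 [] hmeet
    rcases ht : pvLevelA lines (pvGraphA lines) v2 q1 v1 [] with ⟨fl, v', out'⟩
    rw [ht] at hflag
    simp only at hflag
    subst hflag
    show ((a : Int) + (b : Int)) + 1 = pvAns lines X Y
    obtain ⟨r, hr, hrc⟩ := hmeet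
    have hrs : r ∈ pvSphere lines X a := by rw [← hq1]; exact List.mem_toFinset.mpr hr
    have hrb : r ∈ pvBall lines Y b := by
      rw [← hv2]; exact List.mem_toFinset.mpr ((PySem.Set.contains_iff v2 r).mp hrc)
    have hM : pvMeets lines X Y (a + b) :=
      (pv_meet_shift lines hX hY a b).mp
        ⟨r, Finset.mem_inter.mpr ⟨pv_sphere_subset_ball lines X a hrs, hrb⟩⟩
    rw [pv_ans_of_meets lines hX hnm hM]
    push_cast
    ring
  · have hnomeet : ∀ r ∈ q1, ¬ (PySem.Set.contains v2 r = true) := by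
      intro r hr hc
      exact hmeet ⟨r, hr, hc⟩
    obtain ⟨v', out', heq, hinv', hv', hout'⟩ :=
      pv_levelA_no_meet lines v2 q1 v1 [] ⟨hv1nd, List.nodup_nil, by simp⟩ hnomeet
    rw [heq]
    have hdisj : ∀ z, z ∈ pvSphere lines X a → z ∈ pvBall lines Y b → False := by
      intro z hzs hzb
      have hz1 : z ∈ q1 := by rw [← List.mem_toFinset, hq1]; exact hzs
      have hz2 : z ∈ v2 := by rw [← List.mem_toFinset, hv2]; exact hzb
      exact hnomeet z hz1 ((PySem.Set.contains_iff v2 z).mpr hz2)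
    have hnm' : ∀ n, n < (a+1) + b → ¬ pvMeets lines X Y n := by
      have := pv_no_meet_step lines hX hY hnm hdisj
      intro n hn; exact this n (by omega)
    have hcast : ((a : Int) + (b : Int)) + 1 = (((a+1 : Nat)) : Int) + (b : Int) := by
      push_cast; ring
    rw [hcast]
    refine ih X Y hX hY (a+1) b out' v' q2 v2 hinv'.2.1 ?_ hinv'.1 ?_ hq2nd hq2 hv2nd hv2 hnm'
      (by omega)
    · rw [hout', hq1, hv1, pv_sphere_succ]
      simp
    · rw [hv', hq1, hv1, pv_ball_succ_sphere]

lemma pv_loopA (lines : List (List Int)) :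
    ∀ (fuel : Nat) (X Y : Finset Int), X ⊆ pvIdxs lines → Y ⊆ pvIdxs lines →
    ∀ (a b : Nat) (q1 : List Int) (v1 : PySem.Set Int) (q2 : List Int) (v2 : PySem.Set Int),
      q1.Nodup → q1.toFinset = pvSphere lines X a →
      v1.Nodup → v1.toFinset = pvBall lines X a →
      q2.Nodup → q2.toFinset = pvSphere lines Y b →
      v2.Nodup → v2.toFinset = pvBall lines Y b →
      (∀ n, n < a + b → ¬ pvMeets lines X Y n) →
      2 * lines.length + 2 ≤ fuel + a + b →
      pvLoopA lines (pvGraphA lines) fuel q1 v1 q2 v2 ((a : Int) + (b : Int)) = pvAns lines X Y := by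
  intro fuel
  induction fuel with
  | zero =>
    intro X Y hX hY a b q1 v1 q2 v2 _ hq1 _ _ _ hq2 _ _ hnm hfuel
    have hcase : pvSphere lines X a = ∅ ∨ pvSphere lines Y b = ∅ := by
      by_contra hc
      rw [not_or] at hc
      have h1 := pv_sphere_nonempty_bound lines hX (Finset.nonempty_iff_ne_empty.mpr hc.1)
      have h2 := pv_sphere_nonempty_bound lines hY (Finset.nonempty_iff_ne_empty.mpr hc.2)
      omega
    rw [pvLoopA]
    rcases hcase with he | he
    · rw [pv_ans_neg_left lines he hnm]
    · rw [pv_ans_neg_right lines hX hY he hnm]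
  | succ fuel ih =>
    intro X Y hX hY a b q1 v1 q2 v2 hq1nd hq1 hv1nd hv1 hq2nd hq2 hv2nd hv2 hnm hfuel
    rw [pvLoopA]
    by_cases hq : q1 = [] ∨ q2 = []
    · rw [if_pos hq]
      rcases hq with hq | hq
      · have he : pvSphere lines X a = ∅ := by rw [← hq1, hq]; simp
        rw [pv_ans_neg_left lines he hnm]
      · have he : pvSphere lines Y b = ∅ := by rw [← hq2, hq]; simp
        rw [pv_ans_neg_right lines hX hY he hnm]
    · rw [if_neg hq]
      by_cases hsw : q2.length < q1.length
      · rw [if_pos hsw]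
        have hcomm : ((a : Int) + (b : Int)) = ((b : Int) + (a : Int)) := by ring
        rw [hcomm, pv_ans_symm lines hX hY]
        have hnm' : ∀ n, n < b + a → ¬ pvMeets lines Y X n := by
          intro n hn hM
          exact hnm n (by omega) ((pv_meets_symm lines hX hY n).mpr hM)
        exact pv_loopA_step lines fuel ih Y X hY hX b a q2 v2 q1 v1 hq2nd hq2 hv2nd hv2
          hq1nd hq1 hv1nd hv1 hnm' (by omega)
      · rw [if_neg hsw]
        exact pv_loopA_step lines fuel ih X Y hX hY a b q1 v1 q2 v2 hq1nd hq1 hv1nd hv1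
          hq2nd hq2 hv2nd hv2 hnm (by omega)

lemma pv_loopB (lines : List (List Int)) (dest : Int) (S : Finset Int) (hS : S ⊆ pvIdxs lines) :
    ∀ (fuel k : Nat) (fr : List Int) (vis : PySem.Set Int),
      fr.Nodup → fr.toFinset = pvSphere lines S k →
      vis.Nodup → vis.toFinset = pvBall lines S k →
      (∀ n, n < k → ¬ pvMeets lines S (pvLinesThru lines dest) n) →
      lines.length + 1 ≤ fuel + k →
      pvLoopB lines dest fuel fr vis ((k : Int) + 1)
        = pvAns lines S (pvLinesThru lines dest) := by
  intro fuel
  induction fuel with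
  | zero =>
    intro k fr vis _ hfr _ _ hnm hfuel
    have hemp : pvSphere lines S k = ∅ := by
      by_contra hne
      have := pv_sphere_nonempty_bound lines hS (Finset.nonempty_iff_ne_empty.mpr hne)
      omega
    rw [pvLoopB]
    rw [pv_ans_neg_left lines (b := 0) hemp (fun n hn => hnm n (by omega))]
  | succ fuel ih =>
    intro k fr vis hfrnd hfr hvnd hv hnm hfuel
    rw [pvLoopB]
    by_cases hfr0 : fr = []
    · rw [if_pos hfr0]
      have hemp : pvSphere lines S k = ∅ := by rw [← hfr, hfr0]; simp
      rw [pv_ans_neg_left lines (b := 0) hemp (fun n hn => hnm n (by omega))]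
    · rw [if_neg hfr0]
      have hDsub : pvLinesThru lines dest ⊆ pvIdxs lines := Finset.filter_subset _ _
      by_cases hmeet : fr.any (fun i => (PySem.List.pyGetD lines i []).contains dest) = true
      · rw [if_pos hmeet]
        obtain ⟨i, hi, hci⟩ := List.any_eq_true.mp hmeet
        have hik : i ∈ pvSphere lines S k := by rw [← hfr]; exact List.mem_toFinset.mpr hi
        have hiD : i ∈ pvLinesThru lines dest := by
          rw [pvLinesThru, Finset.mem_filter]
          refine ⟨pv_ball_subset_idxs lines hS k (pv_sphere_subset_ball lines S k hik), ?_⟩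
          exact List.mem_of_elem_eq_true hci
        have hM : pvMeets lines S (pvLinesThru lines dest) k :=
          ⟨i, Finset.mem_inter.mpr ⟨pv_sphere_subset_ball lines S k hik, hiD⟩⟩
        rw [pv_ans_of_meets lines hS hnm hM]
      · rw [if_neg hmeet]
        have hdisj : ∀ z, z ∈ pvSphere lines S k → z ∈ pvLinesThru lines dest → False := by
          intro z hzs hzD
          apply hmeet
          rw [List.any_eq_true]
          refine ⟨z, by rw [← List.mem_toFinset, hfr]; exact hzs, ?_⟩
          rw [pvLinesThru, Finset.mem_filter] at hzD
          exact List.elem_eq_true_of_mem hzD.2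
        have hnm' : ∀ n, n < k + 1 → ¬ pvMeets lines S (pvLinesThru lines dest) n := by
          have := pv_no_meet_step lines (b := 0) hS hDsub
            (fun n hn => hnm n (by omega))
            (fun z hzs hzb => hdisj z hzs hzb)
          intro n hn; exact this n (by omega)
        obtain ⟨h1, h2, h3⟩ := pv_foldB_frontier lines fr [] vis ⟨hvnd, List.nodup_nil, by simp⟩
        have hcast : ((k : Int) + 1) + 1 = (((k+1 : Nat)) : Int) + 1 := by push_cast; ring
        rw [hcast]
        refine ih (k+1) _ _ h1.2.1 ?_ h1.1 ?_ hnm' (by omega)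
        · rw [h3, hfr, hv, pv_sphere_succ]
          simp
        · rw [h2, hfr, hv, pv_ball_succ_sphere]


lemma pv_seed_fold (s : List Int) :
    ∀ (p : List Int × PySem.Set Int),
      (s.foldl (fun p r => (p.1 ++ [r], PySem.Set.add p.2 r)) p)
        = (p.1 ++ s, PySem.Set.update p.2 s) := by
  induction s with
  | nil => intro p; simp [PySem.Set.update_nil]
  | cons r rest ih =>
    intro p
    rw [List.foldl_cons, ih, PySem.Set.update_cons]
    simp

lemma pv_seedA_eq (s : PySem.Set Int) : pvSeedA s = (s, PySem.Set.ofList s) := by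
  rw [pvSeedA, pv_seed_fold]
  simp [PySem.Set.update_nil_left, PySem.Set.empty]

lemma pv_ofList_toFinset (l : List Int) : (PySem.Set.ofList l).toFinset = l.toFinset := by
  ext x
  simp only [List.mem_toFinset]
  exact PySem.Set.mem_ofList ..

lemma pv_frontierB_nodup (lines : List (List Int)) (src : Int) :
    (((PySem.List.enumerate lines).filter (fun e => e.2.contains src)).map (fun e => e.1)).Nodup := by
  have h1 : (PySem.List.enumerate lines).Pairwise (fun p q => p.1 < q.1) :=
    PySem.List.pairwise_lt_enumerate ..
  have h2 := h1.filter (fun e => e.2.contains src)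
  rw [List.Nodup, List.pairwise_map]
  exact h2.imp (fun h => ne_of_lt h)

lemma pv_frontierB_toFinset (lines : List (List Int)) (src : Int) :
    (((PySem.List.enumerate lines).filter (fun e => e.2.contains src)).map (fun e => e.1)).toFinset
      = pvLinesThru lines src := by
  ext x
  simp only [List.mem_toFinset, List.mem_map, List.mem_filter]
  constructor
  · rintro ⟨e, ⟨he, hc⟩, rfl⟩
    exact (pv_exists_enumerate lines src e.1).mp ⟨e, he, rfl, List.mem_of_elem_eq_true hc⟩
  · intro hx
    obtain ⟨p, hp, h1, h2⟩ := (pv_exists_enumerate lines src x).mpr hx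
    exact ⟨p, ⟨hp, List.elem_eq_true_of_mem h2⟩, h1.symm⟩

lemma pv_A_eq_ans (lines : List (List Int)) (src dest : Int) (hsd : ¬ src = dest) :
    get_metro_num_to_dest2 lines src dest
      = pvAns lines (pvLinesThru lines src) (pvLinesThru lines dest) := by
  have hS : pvLinesThru lines src ⊆ pvIdxs lines := Finset.filter_subset _ _
  have hD : pvLinesThru lines dest ⊆ pvIdxs lines := Finset.filter_subset _ _
  have h0 : (0 : Int) = ((0 : Nat) : Int) + ((0 : Nat) : Int) := by norm_num
  unfold get_metro_num_to_dest2
  rw [if_neg hsd]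
  simp only [pv_seedA_eq]
  rw [h0]
  refine pv_loopA lines (2 * lines.length + 2) (pvLinesThru lines src) (pvLinesThru lines dest)
    hS hD 0 0 _ _ _ _ (pv_graphA_nodup lines src) (pv_graphA_toFinset lines src)
    (PySem.Set.nodup_ofList ..) ?_ (pv_graphA_nodup lines dest) (pv_graphA_toFinset lines dest)
    (PySem.Set.nodup_ofList ..) ?_ (fun n hn => absurd hn (by omega)) (by omega)
  · rw [pv_ofList_toFinset]
    exact pv_graphA_toFinset lines src
  · rw [pv_ofList_toFinset]
    exact pv_graphA_toFinset lines dest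

lemma pv_B_eq_ans (lines : List (List Int)) (src dest : Int) (hsd : ¬ src = dest) :
    get_metro_num_to_dest2_alt lines src dest
      = pvAns lines (pvLinesThru lines src) (pvLinesThru lines dest) := by
  have hS : pvLinesThru lines src ⊆ pvIdxs lines := Finset.filter_subset _ _
  have h1 : (1 : Int) = ((0 : Nat) : Int) + 1 := by norm_num
  unfold get_metro_num_to_dest2_alt
  rw [if_neg hsd]
  rw [h1]
  refine pv_loopB lines dest (pvLinesThru lines src) hS (lines.length + 1) 0 _ _
    (pv_frontierB_nodup lines src) (pv_frontierB_toFinset lines src)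
    (PySem.Set.nodup_ofList ..) ?_ (fun n hn => absurd hn (by omega)) (by omega)
  · have hupd : PySem.Set.update PySem.Set.empty
        (((PySem.List.enumerate lines).filter (fun e => e.2.contains src)).map (fun e => e.1))
        = PySem.Set.ofList
            (((PySem.List.enumerate lines).filter (fun e => e.2.contains src)).map (fun e => e.1)) := rfl
    rw [hupd, pv_ofList_toFinset]
    exact pv_frontierB_toFinset lines src

-- ===== VERDICT (by name: the statement is the Claim_ definition above) =====
theorem get_metro_num_to_dest2_spec : Claim_equal_get_metro_num_to_dest2 := by
  intro lines src dest _
  unfold Spec_get_metro_num_to_dest2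
  by_cases hsd : src = dest
  · rw [get_metro_num_to_dest2, get_metro_num_to_dest2_alt, if_pos hsd, if_pos hsd]
  · rw [pv_A_eq_ans lines src dest hsd, pv_B_eq_ans lines src dest hsd]
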